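-- pv_equiv track=rewrite | github.com/stevezg/adventOfCode2025 | Day10/solution2.py | solve_machine_gaussian
-- ===== SOURCE A (Python) =====
-- from typing import List, Tuple
--
-- def gaussian_elimination_gf2(A: List[List[int]], b: List[int]) -> Tuple[List[int], bool]:
--     """
--     Solve A x = b over GF(2) using Gaussian elimination.
--     A is n x m matrix (n equations, m variables), b is n-vector, x is m-vector.
--     Returns (solution, is_consistent). Note: may not be minimum weight.
--     """
--     n, m = len(A), len(A[0]) if A else 0
--     if n == 0 or m == 0:
--         return [], len(b) == 0 or all(x == 0 for x in b)
--
--     # A is n x m (n equations, m variables)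
--     # We want to solve A x = b
--
--     # Create augmented matrix [A | b] which is n x (m+1)
--     matrix = [row[:] + [b[i]] for i, row in enumerate(A)]
--
--     # Forward elimination to get row echelon form
--     pivot_cols = []
--     for col in range(min(n, m)):
--         # Find pivot row for this column
--         pivot_row = None
--         for row in range(col, n):
--             if matrix[row][col] == 1:
--                 pivot_row = row
--                 break
--
--         if pivot_row is None:
--             continue
--
--         # Swap rows to bring pivot to current position
--         matrix[col], matrix[pivot_row] = matrix[pivot_row], matrix[col]
--         pivot_cols.append(col)
--
--         # Eliminate below
--         for row in range(col + 1, n):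
--             if matrix[row][col] == 1:
--                 for j in range(m + 1):
--                     matrix[row][j] ^= matrix[col][j]
--
--     # Check consistency
--     rank = len(pivot_cols)
--     for row in range(rank, n):
--         if matrix[row][-1] == 1:
--             return [], False  # Inconsistent
--
--     # Back substitution to find solution
--     x = [0] * m
--
--     for i in range(rank - 1, -1, -1):
--         pivot_col = pivot_cols[i]
--         sum_val = matrix[i][-1]
--         for j in range(pivot_col + 1, m):
--             sum_val ^= (matrix[i][j] * x[j])
--         x[pivot_col] = sum_val
--
--     return x, True
--
-- def solve_machine_gaussian(target: List[int], buttons: List[List[int]]) -> int: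
--     """Solve for minimum button presses using Gaussian elimination over GF(2)."""
--     n = len(target)  # number of lights
--     m = len(buttons)  # number of buttons
--
--     if m == 0:
--         return 0 if all(t == 0 for t in target) else -1
--
--     # Create matrix A as n x m (n equations for lights, m variables for buttons)
--     # Each column represents a button's effect on all lights
--     A = [[0] * m for _ in range(n)]
--     for j, button in enumerate(buttons):
--         for light_idx in button:
--             if light_idx < n:
--                 A[light_idx][j] = 1
--
--     # Solve A x = target over GF(2), where x is the solution vector
--     solution, consistent = gaussian_elimination_gf2(A, target)
--
--     if not consistent:
--         return -1  # No solution
--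
--     # Count the number of presses (number of 1's in solution)
--     # Note: This may not be the minimum weight solution
--     return sum(solution)
-- ===== SOURCE B (Python) =====
-- def solve_machine_gaussian(target, buttons):
--     """Same elimination order as A, but working rows are frozensets of original
--     equation indices: a row operation is a set symmetric difference, and matrix
--     entries / right-hand sides are evaluated on demand as XOR dot products
--     against the original system, so no augmented matrix is ever materialized."""
--     n = len(target)
--     m = len(buttons)
--     if m == 0:
--         return 0 if all(t == 0 for t in target) else -1
--     A0 = [[0] * m for _ in range(n)]
--     for j, button in enumerate(buttons):
--         for light_idx in button:
--             if light_idx < n: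
--                 A0[light_idx][j] = 1
--
--     def entry(S, c):
--         v = 0
--         for i in S:
--             v ^= A0[i][c]
--         return v
--
--     def rhs(S):
--         v = 0
--         for i in S:
--             v ^= target[i]
--         return v
--
--     rows = [frozenset([r]) for r in range(n)]
--     pivots = []
--     for col in range(min(n, m)):
--         pr = None
--         for r in range(col, n):
--             if entry(rows[r], col) == 1:
--                 pr = r
--                 break
--         if pr is None:
--             continue
--         rows[col], rows[pr] = rows[pr], rows[col]
--         pivots.append(col)
--         piv = rows[col]
--         rows = [S ^ piv if r > col and entry(S, col) == 1 else S
--                 for r, S in enumerate(rows)]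
--     rank = len(pivots)
--     for r in range(rank, n):
--         if rhs(rows[r]) == 1:
--             return -1
--     x = [0] * m
--     for i in range(rank - 1, -1, -1):
--         pc = pivots[i]
--         s = rhs(rows[i])
--         for j in range(pc + 1, m):
--             if entry(rows[i], j) == 1:
--                 s ^= x[j]
--         x[pc] = s
--     return sum(x)
-- ===== Notes on version B (the rewrite author's own statement) =====
-- stated objective: alternative
-- what changed: B never materializes or mutates the augmented matrix: each working row is a frozenset of original equation indices, a row operation is a set symmetric difference, and matrix entries / right-hand sides are evaluated on demand as XOR dot products against the original system (same pivot order and free-variables-zero convention).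
import Mathlib
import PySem

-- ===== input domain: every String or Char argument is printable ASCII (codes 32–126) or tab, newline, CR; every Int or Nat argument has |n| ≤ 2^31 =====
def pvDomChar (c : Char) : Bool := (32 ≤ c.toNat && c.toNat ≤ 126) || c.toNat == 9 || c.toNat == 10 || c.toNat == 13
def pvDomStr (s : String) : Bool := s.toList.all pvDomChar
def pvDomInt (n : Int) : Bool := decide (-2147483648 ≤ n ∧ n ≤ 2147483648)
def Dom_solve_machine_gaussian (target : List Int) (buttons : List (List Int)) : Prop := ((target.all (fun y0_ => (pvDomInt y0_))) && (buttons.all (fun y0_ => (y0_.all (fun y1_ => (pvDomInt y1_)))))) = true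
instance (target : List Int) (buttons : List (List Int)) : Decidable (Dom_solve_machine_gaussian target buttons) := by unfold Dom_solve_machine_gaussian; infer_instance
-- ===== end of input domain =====

-- B replaces A's mutated augmented matrix by rows represented as index SETS of original
-- equations: a row operation is a set symmetric difference and entries/rhs are evaluated
-- on demand as XOR dot products against the original system; same pivot order, same
-- free-variables-zero convention, hence the same returned value (objective: alternative).

-- ===== PORT A =====

-- body of `for j, button in enumerate(buttons): for light_idx in button: ...`
-- (Source B builds the raw 0/1 matrix A0 with literally the same two loops, so this
--  helper is shared by both ports)
def pvBuildStepA (n : Int) (A : List (List Int)) (jb : Int × List Int) : List (List Int) :=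
  jb.2.foldl
    (fun A idx =>
      if idx < n then
        -- A[light_idx][j] = 1  (Python indexing incl. negative wrap; pySetD/pyGetD are exact)
        PySem.List.pySetD A idx (PySem.List.pySetD (PySem.List.pyGetD A idx []) jb.1 1)
      else A) A

-- inner `for j in range(m+1): matrix[row][j] ^= matrix[col][j]` (p is the pivot row, fixed)
def pvElimRowA (m : Int) (r p : List Int) : List Int :=
  (PySem.List.pyRange 0 (m + 1) 1).foldl
    (fun r j => PySem.List.pySetD r j (PySem.Int.bxor (PySem.List.pyGetD r j 0) (PySem.List.pyGetD p j 0))) r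

-- body of `for row in range(col+1, n): if matrix[row][col] == 1: ...`
def pvStepRowA (m col : Int) (mat : List (List Int)) (row : Int) : List (List Int) :=
  if PySem.List.pyGetD (PySem.List.pyGetD mat row []) col 0 == 1 then
    PySem.List.pySetD mat row (pvElimRowA m (PySem.List.pyGetD mat row []) (PySem.List.pyGetD mat col []))
  else mat

-- body of `for col in range(min(n,m))` in gaussian_elimination_gf2
def pvElimStepA (n m : Int) (st : List (List Int) × List Int) (col : Int) : List (List Int) × List Int :=
  match (PySem.List.pyRange col n 1).find?
      (fun r => PySem.List.pyGetD (PySem.List.pyGetD st.1 r []) col 0 == 1) with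
  | none => st
  | some pr =>
    let rc := PySem.List.pyGetD st.1 col []
    let rp := PySem.List.pyGetD st.1 pr []
    let mat1 := PySem.List.pySetD (PySem.List.pySetD st.1 col rp) pr rc
    ((PySem.List.pyRange (col + 1) n 1).foldl (pvStepRowA m col) mat1, st.2 ++ [col])

-- body of the back-substitution loop `for i in range(rank-1, -1, -1)`
def pvBackStepA (mat : List (List Int)) (piv : List Int) (m : Int) (x : List Int) (i : Int) : List Int :=
  let pc := PySem.List.pyGetD piv i 0
  let row := PySem.List.pyGetD mat i []
  let s := (PySem.List.pyRange (pc + 1) m 1).foldl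
    (fun s j => PySem.Int.bxor s (PySem.List.pyGetD row j 0 * PySem.List.pyGetD x j 0))
    (PySem.List.pyGetD row (-1) 0)
  PySem.List.pySetD x pc s

-- gaussian_elimination_gf2
def pvGaussA (A : List (List Int)) (b : List Int) : List Int × Bool :=
  let n : Int := A.length
  let m : Int := if A.isEmpty then 0 else (PySem.List.pyGetD A 0 []).length
  if n = 0 ∨ m = 0 then ([], (decide (b.length = 0) || b.all (· == 0)))
  else
    let matrix := (PySem.List.enumerate A 0).map
      (fun ia => ia.2 ++ [PySem.List.pyGetD b ia.1 0])
    let st := (PySem.List.pyRange 0 (min n m) 1).foldl (pvElimStepA n m) (matrix, [])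
    let rank : Int := st.2.length
    if (PySem.List.pyRange rank n 1).any
        (fun row => PySem.List.pyGetD (PySem.List.pyGetD st.1 row []) (-1) 0 == 1) then
      ([], false)
    else
      let x := (PySem.List.pyRange (rank - 1) (-1) (-1)).foldl
        (pvBackStepA st.1 st.2 m) (List.replicate m.toNat 0)
      (x, true)

def solve_machine_gaussian (target : List Int) (buttons : List (List Int)) : Int :=
  let n : Int := target.length
  let m : Int := buttons.length
  if m = 0 then (if target.all (· == 0) then 0 else -1)
  else
    let A0 := (PySem.List.pyRange 0 n 1).map (fun _ => List.replicate m.toNat (0 : Int))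
    let A := (PySem.List.enumerate buttons 0).foldl (pvBuildStepA n) A0
    let sc := pvGaussA A target
    if !sc.2 then -1 else sc.1.sum

-- ===== PORT B =====

-- `entry(S, c)`: XOR dot product of the index set against column c of A0
def pvEntryB (A0 : List (List Int)) (S : List Int) (c : Int) : Int :=
  S.foldl (fun v i => PySem.Int.bxor v (PySem.List.pyGetD (PySem.List.pyGetD A0 i []) c 0)) 0

-- `rhs(S)`: XOR of the target entries of the index set
def pvRhsB (target : List Int) (S : List Int) : Int :=
  S.foldl (fun v i => PySem.Int.bxor v (PySem.List.pyGetD target i 0)) 0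

-- frozenset symmetric difference `S ^ piv`; a Python frozenset iterates in unspecified
-- order and pvEntryB/pvRhsB are order-insensitive XOR folds, so this order is exact
def pvSymmDiff (S P : List Int) : List Int :=
  S.filter (fun i => decide (i ∉ P)) ++ P.filter (fun i => decide (i ∉ S))

-- body of B's `for col in range(min(n,m))` loop; state = (rows as index sets, pivots)
def pvElimStepB (A0 : List (List Int)) (n : Int) (st : List (List Int) × List Int) (col : Int) :
    List (List Int) × List Int :=
  match (PySem.List.pyRange col n 1).find?
      (fun r => pvEntryB A0 (PySem.List.pyGetD st.1 r []) col == 1) with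
  | none => st
  | some pr =>
    let sc := PySem.List.pyGetD st.1 col []
    let sp := PySem.List.pyGetD st.1 pr []
    let rows1 := PySem.List.pySetD (PySem.List.pySetD st.1 col sp) pr sc
    let piv := PySem.List.pyGetD rows1 col []
    let rows2 := (PySem.List.enumerate rows1 0).map
      (fun rS => if rS.1 > col ∧ pvEntryB A0 rS.2 col == 1 then pvSymmDiff rS.2 piv else rS.2)
    (rows2, st.2 ++ [col])

-- body of B's back-substitution loop
def pvBackStepB (A0 : List (List Int)) (target : List Int) (rows : List (List Int))
    (piv : List Int) (m : Int) (x : List Int) (i : Int) : List Int :=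
  let pc := PySem.List.pyGetD piv i 0
  let S := PySem.List.pyGetD rows i []
  let s := (PySem.List.pyRange (pc + 1) m 1).foldl
    (fun s j => if pvEntryB A0 S j == 1 then PySem.Int.bxor s (PySem.List.pyGetD x j 0) else s)
    (pvRhsB target S)
  PySem.List.pySetD x pc s

def solve_machine_gaussian_alt (target : List Int) (buttons : List (List Int)) : Int :=
  let n : Int := target.length
  let m : Int := buttons.length
  if m = 0 then (if target.all (· == 0) then 0 else -1)
  else
    let A00 := (PySem.List.pyRange 0 n 1).map (fun _ => List.replicate m.toNat (0 : Int))
    let A0 := (PySem.List.enumerate buttons 0).foldl (pvBuildStepA n) A00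
    let rows0 := (PySem.List.pyRange 0 n 1).map (fun r => [r])
    let st := (PySem.List.pyRange 0 (min n m) 1).foldl (pvElimStepB A0 n) (rows0, [])
    let rank : Int := st.2.length
    if (PySem.List.pyRange rank n 1).any
        (fun r => pvRhsB target (PySem.List.pyGetD st.1 r []) == 1) then -1
    else
      ((PySem.List.pyRange (rank - 1) (-1) (-1)).foldl
        (pvBackStepB A0 target st.1 st.2 m) (List.replicate m.toNat 0)).sum

-- ===== PRECONDITION & SPEC =====
-- Pre_ excludes exactly the inputs where A raises IndexError: a button entry below
-- -len(target) is used as a (wrapping) list index into the n rows.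
def Pre_solve_machine_gaussian (target : List Int) (buttons : List (List Int)) : Prop :=
  ∀ bt ∈ buttons, ∀ idx ∈ bt, -(target.length : Int) ≤ idx
instance (target : List Int) (buttons : List (List Int)) : Decidable (Pre_solve_machine_gaussian target buttons) := by unfold Pre_solve_machine_gaussian; infer_instance

def pvWitness_solve_machine_gaussian : List Int × List (List Int) := ([1, 0, 1], [[0, 2], [1], [2, 0]])

def Spec_solve_machine_gaussian (target : List Int) (buttons : List (List Int)) (out : Int) : Prop := out = solve_machine_gaussian_alt target buttons
instance (target : List Int) (buttons : List (List Int)) (out : Int) : Decidable (Spec_solve_machine_gaussian target buttons out) := by unfold Spec_solve_machine_gaussian; infer_instance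

-- ===== CLAIM (what is proved, stated in full; the proofs are below) =====
def Claim_equal_solve_machine_gaussian : Prop := ∀ (target : List Int) (buttons : List (List Int)), Dom_solve_machine_gaussian target buttons → Pre_solve_machine_gaussian target buttons → Spec_solve_machine_gaussian target buttons (solve_machine_gaussian target buttons)

-- ===== LEMMAS AND PROOFS =====

-- ---- xor algebra ----

theorem pvBxorEq (a b : Int) : PySem.Int.bxor a b = Int.xor a b := by
  unfold PySem.Int.bxor Int.xor
  rcases a with m | m <;> rcases b with n | n <;> simp [Int.negSucc_eq] <;> omega

theorem pvBxorAssoc (a b c : Int) :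
    PySem.Int.bxor (PySem.Int.bxor a b) c = PySem.Int.bxor a (PySem.Int.bxor b c) := by
  simp only [pvBxorEq]
  unfold Int.xor
  rcases a with m | m <;> rcases b with n | n <;> rcases c with k | k <;> simp [Nat.xor_assoc]

theorem pvBxorZeroL (a : Int) : PySem.Int.bxor 0 a = a := by
  rw [PySem.Int.bxor_comm]; simp

theorem pvBxorLeftComm (a b c : Int) :
    PySem.Int.bxor a (PySem.Int.bxor b c) = PySem.Int.bxor b (PySem.Int.bxor a c) := by
  rw [← pvBxorAssoc, PySem.Int.bxor_comm a b, pvBxorAssoc]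

theorem pvBxorCancel (a x : Int) : PySem.Int.bxor a (PySem.Int.bxor a x) = x := by
  rw [← pvBxorAssoc, PySem.Int.bxor_self, pvBxorZeroL]

-- ---- order-insensitive xor folds ----

def pvXf (f : Int → Int) (S : List Int) : Int :=
  S.foldl (fun v i => PySem.Int.bxor v (f i)) 0

theorem pvXf_init (f : Int → Int) :
    ∀ (l : List Int) (a : Int),
      l.foldl (fun v i => PySem.Int.bxor v (f i)) a = PySem.Int.bxor a (pvXf f l) := by
  intro l
  induction l with
  | nil => intro a; simp [pvXf]
  | cons x xs ih =>
    intro a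
    have hx : pvXf f (x :: xs) = PySem.Int.bxor (f x) (pvXf f xs) := by
      have : pvXf f (x :: xs)
          = xs.foldl (fun v i => PySem.Int.bxor v (f i)) (PySem.Int.bxor 0 (f x)) := rfl
      rw [this, ih (PySem.Int.bxor 0 (f x)), pvBxorZeroL]
    rw [List.foldl_cons, ih (PySem.Int.bxor a (f x)), hx, pvBxorAssoc]

theorem pvXf_cons (f : Int → Int) (x : Int) (l : List Int) :
    pvXf f (x :: l) = PySem.Int.bxor (f x) (pvXf f l) := by
  have : pvXf f (x :: l)
      = l.foldl (fun v i => PySem.Int.bxor v (f i)) (PySem.Int.bxor 0 (f x)) := rfl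
  rw [this, pvXf_init, pvBxorZeroL]

theorem pvXf_append (f : Int → Int) (l1 l2 : List Int) :
    pvXf f (l1 ++ l2) = PySem.Int.bxor (pvXf f l1) (pvXf f l2) := by
  have : pvXf f (l1 ++ l2)
      = l2.foldl (fun v i => PySem.Int.bxor v (f i)) (pvXf f l1) := by
    simp [pvXf, List.foldl_append]
  rw [this, pvXf_init]

theorem pvXf_perm (f : Int → Int) {l l' : List Int} (h : l.Perm l') : pvXf f l = pvXf f l' := by
  induction h with
  | nil => rfl
  | cons x _ ih => rw [pvXf_cons, pvXf_cons, ih]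
  | swap x y l => simp only [pvXf_cons]; rw [pvBxorLeftComm]
  | trans _ _ ih1 ih2 => rw [ih1, ih2]

theorem pvXfSymmDiff (f : Int → Int) :
    ∀ (S P : List Int), S.Nodup → P.Nodup →
      pvXf f (pvSymmDiff S P) = PySem.Int.bxor (pvXf f S) (pvXf f P) := by
  intro S
  induction S with
  | nil =>
    intro P _ _
    simp only [pvSymmDiff, List.filter_nil, List.nil_append]
    rw [show (P.filter (fun i => decide (i ∉ ([] : List Int)))) = P by
      apply List.filter_eq_self.mpr; intro x _; simp]
    rw [show pvXf f [] = 0 from rfl, pvBxorZeroL]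
  | cons a S' ih =>
    intro P hS hP
    have haS : a ∉ S' := (List.nodup_cons.mp hS).1
    have hS' : S'.Nodup := (List.nodup_cons.mp hS).2
    by_cases hap : a ∈ P
    · -- a cancels: it is dropped from both parts of the symmetric difference
      have h1 : (a :: S').filter (fun i => decide (i ∉ P))
          = S'.filter (fun i => decide (i ∉ P)) := by
        simp [List.filter_cons, hap]
      have haf : a ∈ P.filter (fun i => decide (i ∉ S')) := by
        simp [List.mem_filter, hap, haS]
      have hperm : (P.filter (fun i => decide (i ∉ S'))).Perm
          (a :: (P.filter (fun i => decide (i ∉ S'))).erase a) := List.perm_cons_erase haf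
      have hnd : (P.filter (fun i => decide (i ∉ S'))).Nodup := hP.filter _
      have herase : (P.filter (fun i => decide (i ∉ S'))).erase a
          = P.filter (fun i => decide (i ∉ (a :: S'))) := by
        rw [hnd.erase_eq_filter]
        rw [List.filter_filter]
        apply List.filter_congr
        intro x _
        by_cases hxa : x = a <;> by_cases hxs : x ∈ S' <;> simp [hxa, hxs, bne]
      have hxfP : pvXf f (P.filter (fun i => decide (i ∉ S')))
          = PySem.Int.bxor (f a) (pvXf f (P.filter (fun i => decide (i ∉ (a :: S'))))) := by
        rw [pvXf_perm f hperm, pvXf_cons, herase]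
      have hih := ih P hS' hP
      simp only [pvSymmDiff, pvXf_append] at hih ⊢
      rw [h1, pvXf_cons]
      rw [hxfP] at hih
      have := congrArg (PySem.Int.bxor (f a)) hih
      rw [pvBxorLeftComm (f a) _ (PySem.Int.bxor (f a) _), pvBxorCancel] at this
      rw [this, pvBxorAssoc]
    · -- a survives in the first part
      have h1 : (a :: S').filter (fun i => decide (i ∉ P))
          = a :: S'.filter (fun i => decide (i ∉ P)) := by
        simp [List.filter_cons, hap]
      have h2 : P.filter (fun i => decide (i ∉ (a :: S')))
          = P.filter (fun i => decide (i ∉ S')) := by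
        apply List.filter_congr
        intro x hx
        have hxa : ¬ x = a := by intro h; exact hap (h ▸ hx)
        simp [hxa]
      have hih := ih P hS' hP
      simp only [pvSymmDiff, pvXf_append] at hih ⊢
      rw [h1, h2, pvXf_cons, pvXf_cons, pvBxorAssoc, hih, pvBxorAssoc]

-- ---- generic helpers (shared with the relation proofs) ----

theorem pvFindCongr {α : Type} (p q : α → Bool) :
    ∀ (l : List α), (∀ x ∈ l, p x = q x) → l.find? p = l.find? q := by
  intro l
  induction l with
  | nil => intro _; rfl
  | cons x xs ih =>
    intro h
    simp only [List.find?]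
    rw [h x (by simp)]
    cases q x with
    | true => rfl
    | false => exact ih (fun y hy => h y (by simp [hy]))

theorem pvPySetD_oob {α : Type} (xs : List α) (i : Int) (v : α)
    (h : ¬ PySem.Raise.InRange xs.length i) : PySem.List.pySetD xs i v = xs := by
  simp only [PySem.List.pySetD, PySem.List.pySet?, PySem.List.pyIdx?, PySem.Raise.InRange] at *
  split_ifs with h1 h2 h3 <;> simp <;> omega

theorem pvPyGetD_oob {α : Type} (xs : List α) (i : Int) (d : α)
    (h : ¬ PySem.Raise.InRange xs.length i) : PySem.List.pyGetD xs i d = d := by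
  simp only [PySem.List.pyGetD, PySem.List.pyGet?, PySem.List.pyIdx?, PySem.Raise.InRange] at *
  split_ifs with h1 h2 h3 <;> simp <;> omega

theorem pvPyGetD_irrel {α : Type} (xs : List α) (i : Int) (d1 d2 : α)
    (h : PySem.Raise.InRange xs.length i) :
    PySem.List.pyGetD xs i d1 = PySem.List.pyGetD xs i d2 := by
  obtain ⟨h1, h2⟩ := h
  rcases (by omega : 0 ≤ i ∨ i < 0) with h0 | h0
  · rw [PySem.List.pyGetD_eq_getElem xs d1 h0 h2, PySem.List.pyGetD_eq_getElem xs d2 h0 h2]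
  · have hi : i = -(((-i).toNat : Nat) : Int) := by omega
    rw [hi, PySem.List.pyGetD_neg_natCast xs _ d1 (by omega) (by omega),
      PySem.List.pyGetD_neg_natCast xs _ d2 (by omega) (by omega)]

theorem pvPySetD_map {α β : Type} (f : α → β) (xs : List α) (i : Int) (v : α) :
    PySem.List.pySetD (xs.map f) i (f v) = (PySem.List.pySetD xs i v).map f := by
  simp only [PySem.List.pySetD, PySem.List.pySet?, List.length_map]
  cases h : PySem.List.pyIdx? xs.length i with
  | none => simp
  | some k => simp [List.map_set]

theorem pvPyGetD_nonneg_getD {α : Type} (xs : List α) (i : Int) (d : α) (h0 : 0 ≤ i) :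
    PySem.List.pyGetD xs i d = xs.getD i.toNat d := by
  have hi : i = ((i.toNat : Nat) : Int) := by omega
  rw [hi, PySem.List.pyGetD_natCast]
  have h2 : ((i.toNat : Int)).toNat = i.toNat := by omega
  rw [h2]

theorem pvMemPySetD {α : Type} (xs : List α) (i : Int) (v a : α)
    (h : a ∈ PySem.List.pySetD xs i v) : a ∈ xs ∨ a = v := by
  simp only [PySem.List.pySetD, PySem.List.pySet?] at h
  cases hk : PySem.List.pyIdx? xs.length i with
  | none => rw [hk] at h; simp at h; exact Or.inl h
  | some k => rw [hk] at h; simp at h; exact List.mem_or_eq_of_mem_set h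

-- ---- the abstraction: an index set plus A0/target abstracts an augmented row ----

def pvRowVal (A0 : List (List Int)) (target : List Int) (m : Nat) (S : List Int) : List Int :=
  (PySem.List.pyRange 0 (m : Int) 1).map (fun c => pvEntryB A0 S c) ++ [pvRhsB target S]

theorem pvEntryB_eq_xf (A0 : List (List Int)) (S : List Int) (c : Int) :
    pvEntryB A0 S c = pvXf (fun i => PySem.List.pyGetD (PySem.List.pyGetD A0 i []) c 0) S := rfl

theorem pvRhsB_eq_xf (target : List Int) (S : List Int) :
    pvRhsB target S = pvXf (fun i => PySem.List.pyGetD target i 0) S := rfl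

theorem length_pvRowVal (A0 : List (List Int)) (target : List Int) (m : Nat) (S : List Int) :
    (pvRowVal A0 target m S).length = m + 1 := by
  simp [pvRowVal, PySem.List.length_pyRange_one]

theorem pvRowValGetNat (A0 : List (List Int)) (target : List Int) (m : Nat) (S : List Int)
    (k : Nat) (hk : k < m) :
    (pvRowVal A0 target m S).getD k 0 = pvEntryB A0 S (k : Int) := by
  unfold pvRowVal
  have hlr : k < ((PySem.List.pyRange 0 (m : Int) 1).map (fun c => pvEntryB A0 S c)).length := by
    simp [PySem.List.length_pyRange_one]; omega
  rw [List.getD_append _ _ _ _ hlr, List.getD_eq_getElem _ _ hlr,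
    List.getElem_map, PySem.List.getElem_pyRange_one]
  rw [zero_add]

theorem pvRowValLastNat (A0 : List (List Int)) (target : List Int) (m : Nat) (S : List Int) :
    (pvRowVal A0 target m S).getD m 0 = pvRhsB target S := by
  unfold pvRowVal
  have hlr : ((PySem.List.pyRange 0 (m : Int) 1).map (fun c => pvEntryB A0 S c)).length = m := by
    simp [PySem.List.length_pyRange_one]
  rw [List.getD_append_right _ _ _ _ (by omega), hlr]
  simp

theorem pvRowValGet (A0 : List (List Int)) (target : List Int) (m : Nat) (S : List Int)
    (c : Int) (h0 : 0 ≤ c) (hm : c < (m : Int)) :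
    PySem.List.pyGetD (pvRowVal A0 target m S) c 0 = pvEntryB A0 S c := by
  have hc : c = ((c.toNat : Nat) : Int) := by omega
  rw [pvPyGetD_nonneg_getD _ _ _ h0, pvRowValGetNat A0 target m S c.toNat (by omega), ← hc]

theorem pvRowValLast (A0 : List (List Int)) (target : List Int) (m : Nat) (S : List Int) :
    PySem.List.pyGetD (pvRowVal A0 target m S) (-1) 0 = pvRhsB target S := by
  unfold pvRowVal
  exact PySem.List.pyGetD_neg_one_append_singleton _ _ _

theorem pvSymmDiff_nodup (S P : List Int) (hS : S.Nodup) (hP : P.Nodup) :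
    (pvSymmDiff S P).Nodup := by
  unfold pvSymmDiff
  apply List.Nodup.append (hS.filter _) (hP.filter _)
  intro x hx1 hx2
  rw [List.mem_filter] at hx1 hx2
  simp only [decide_eq_true_eq] at hx1 hx2
  exact hx2.2 hx1.1

-- ---- the inner xor loop of A equals a pointwise xor (reused from the A-side shape) ----

theorem pvFoldSetXor (p : List Int) : ∀ (k : Nat) (r : List Int), k ≤ r.length →
    (PySem.List.pyRange 0 (k : Int) 1).foldl
      (fun r j => PySem.List.pySetD r j
        (PySem.Int.bxor (PySem.List.pyGetD r j 0) (PySem.List.pyGetD p j 0))) r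
    = (List.range k).map (fun j => PySem.Int.bxor (r.getD j 0) (p.getD j 0)) ++ r.drop k := by
  intro k
  induction k with
  | zero => intro r h; simp [PySem.List.pyRange_one_eq_nil (by omega : (0:Int) ≤ 0)]
  | succ k ih =>
    intro r h
    rw [show ((k + 1 : Nat) : Int) = (k : Int) + 1 by push_cast; ring,
      PySem.List.pyRange_one_succ_right (by positivity), List.foldl_append, ih r (by omega)]
    simp only [List.foldl_cons, List.foldl_nil]
    have hlmap : ((List.range k).map
        (fun j => PySem.Int.bxor (r.getD j 0) (p.getD j 0))).length = k := by simp
    have hget : PySem.List.pyGetD ((List.range k).map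
        (fun j => PySem.Int.bxor (r.getD j 0) (p.getD j 0)) ++ r.drop k) (k : Int) 0
        = r.getD k 0 := by
      rw [PySem.List.pyGetD_natCast, List.getD_append_right _ _ _ _ (by omega), hlmap]
      simp only [Nat.sub_self]
      rw [List.getD_eq_getElem _ _ (by simp; omega), List.getD_eq_getElem _ _ (by omega)]
      simp [List.getElem_drop]
    rw [hget, PySem.List.pySetD_natCast, List.set_append]
    rw [if_neg (by omega), hlmap, Nat.sub_self]
    rw [List.drop_eq_getElem_cons (by omega : k < r.length), List.set_cons_zero]
    rw [List.range_succ, List.map_append, List.append_assoc]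
    simp only [List.map_cons, List.map_nil, List.singleton_append]
    rw [PySem.List.pyGetD_natCast p k 0, List.getD_eq_getElem r 0 (n := k) (by omega)]

theorem pvElimRowValEq (A0 : List (List Int)) (target : List Int) (m : Nat)
    (S P : List Int) (hS : S.Nodup) (hP : P.Nodup) :
    pvElimRowA (m : Int) (pvRowVal A0 target m S) (pvRowVal A0 target m P)
      = pvRowVal A0 target m (pvSymmDiff S P) := by
  unfold pvElimRowA
  rw [show ((m : Int) + 1) = ((m + 1 : Nat) : Int) by push_cast; ring]
  rw [pvFoldSetXor _ (m + 1) _ (by rw [length_pvRowVal])]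
  rw [List.drop_eq_nil_of_le (by rw [length_pvRowVal])]
  rw [List.append_nil]
  apply List.ext_getElem (by simp [length_pvRowVal])
  intro k hk1 hk2
  have hkm1 : k < m + 1 := by simpa using hk1
  simp only [List.getElem_map, List.getElem_range]
  have hgetd : (pvRowVal A0 target m (pvSymmDiff S P))[k]'hk2
      = (pvRowVal A0 target m (pvSymmDiff S P)).getD k 0 :=
    (List.getD_eq_getElem _ _ hk2).symm
  rw [hgetd]
  rcases (by omega : k < m ∨ k = m) with hkm | hkm
  · rw [pvRowValGetNat A0 target m S k hkm, pvRowValGetNat A0 target m P k hkm,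
      pvRowValGetNat A0 target m (pvSymmDiff S P) k hkm,
      pvEntryB_eq_xf, pvEntryB_eq_xf, pvEntryB_eq_xf, pvXfSymmDiff _ S P hS hP]
  · rw [hkm]
    rw [pvRowValLastNat A0 target m S, pvRowValLastNat A0 target m P,
      pvRowValLastNat A0 target m (pvSymmDiff S P),
      pvRhsB_eq_xf, pvRhsB_eq_xf, pvRhsB_eq_xf, pvXfSymmDiff _ S P hS hP]

-- ---- A's inner elimination fold described elementwise ----

theorem pvGetD_set_self {a : Type} (xs : List a) (i : Nat) (h : i < xs.length) (v d : a) :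
    (xs.set i v).getD i d = v := by
  simp [List.getD, h]

theorem pvGetD_set_ne {a : Type} (xs : List a) (i j : Nat) (hij : i ≠ j) (v d : a) :
    (xs.set i v).getD j d = xs.getD j d := by
  simp [List.getD, List.getElem?_set, hij]

theorem pvGetD_map {a b : Type} (f : a → b) (l : List a) (j : Nat) (h : j < l.length)
    (d : b) (d' : a) : (l.map f).getD j d = f (l.getD j d') := by
  rw [List.getD_eq_getElem _ _ (by simpa using h), List.getElem_map,
    List.getD_eq_getElem _ _ h]

theorem pvElimFoldA (m n col : Int) (hc0 : 0 ≤ col) :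
    ∀ (cnt : Nat) (k : Int) (mat : List (List Int)), col < k → (mat.length : Int) = n →
      n - k ≤ (cnt : Int) →
      (((PySem.List.pyRange k n 1).foldl (pvStepRowA m col) mat).length = mat.length) ∧
      ∀ (j : Nat), j < mat.length →
        ((PySem.List.pyRange k n 1).foldl (pvStepRowA m col) mat).getD j [] =
          (if k ≤ (j : Int) ∧ PySem.List.pyGetD (mat.getD j []) col 0 == 1
            then pvElimRowA m (mat.getD j []) (PySem.List.pyGetD mat col [])
            else mat.getD j []) := by
  intro cnt
  induction cnt with
  | zero =>
    intro k mat hk hlen hcnt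
    rw [PySem.List.pyRange_one_eq_nil (by omega : n ≤ k)]
    refine ⟨rfl, ?_⟩
    intro j hj
    simp only [List.foldl_nil]
    rw [if_neg (fun h => absurd h.1 (by omega))]
  | succ cnt ih =>
    intro k mat hk hlen hcnt
    by_cases hkn : n ≤ k
    · rw [PySem.List.pyRange_one_eq_nil hkn]
      refine ⟨rfl, ?_⟩
      intro j hj
      simp only [List.foldl_nil]
      rw [if_neg (fun h => absurd h.1 (by omega))]
    · have hkn2 : k < n := by omega
      rw [PySem.List.pyRange_one_cons hkn2, List.foldl_cons]
      have hk0 : 0 ≤ k := by omega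
      have hkin : k.toNat < mat.length := by omega
      have hcolin : col.toNat < mat.length := by omega
      set mat' := pvStepRowA m col mat k with hmat'
      have hset : ∀ v, PySem.List.pySetD mat k v = mat.set k.toNat v := by
        intro v
        conv_lhs => rw [show k = ((k.toNat : Nat) : Int) by omega]
        exact PySem.List.pySetD_natCast mat k.toNat v
      have hgk : PySem.List.pyGetD mat k [] = mat.getD k.toNat [] :=
        pvPyGetD_nonneg_getD _ _ _ hk0
      have hlen' : mat'.length = mat.length := by
        rw [hmat']; unfold pvStepRowA
        split_ifs
        · rw [hset]; simp
        · rfl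
      have hmat'j : ∀ (j : Nat), j < mat.length →
          mat'.getD j [] = (if (j : Int) = k ∧ PySem.List.pyGetD (mat.getD j []) col 0 == 1
            then pvElimRowA m (mat.getD j []) (PySem.List.pyGetD mat col [])
            else mat.getD j []) := by
        intro j hj
        rw [hmat']; unfold pvStepRowA
        rw [hgk]
        by_cases hg : PySem.List.pyGetD (mat.getD k.toNat []) col 0 == 1
        · rw [if_pos hg, hset]
          by_cases hjk : (j : Int) = k
          · have hjeq : j = k.toNat := by omega
            subst hjeq
            rw [pvGetD_set_self _ _ hkin, if_pos ⟨hjk, hg⟩]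
          · rw [pvGetD_set_ne _ _ _ (by omega), if_neg (fun h => hjk h.1)]
        · rw [if_neg hg]
          by_cases hjk : (j : Int) = k
          · have hjeq : j = k.toNat := by omega
            subst hjeq
            rw [if_neg (fun h => hg h.2)]
          · rw [if_neg (fun h => hjk h.1)]
      have hmat'col : mat'.getD col.toNat [] = mat.getD col.toNat [] := by
        rw [hmat'j col.toNat hcolin, if_neg (fun h => absurd h.1 (by omega))]
      have hcol' : PySem.List.pyGetD mat' col [] = PySem.List.pyGetD mat col [] := by
        rw [pvPyGetD_nonneg_getD mat' col [] hc0, pvPyGetD_nonneg_getD mat col [] hc0,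
          hmat'col]
      obtain ⟨ihlen, ihdesc⟩ := ih (k + 1) mat' (by omega) (by omega) (by omega)
      refine ⟨by rw [ihlen, hlen'], ?_⟩
      intro j hj
      rw [ihdesc j (by omega), hcol']
      rcases (by omega : (j : Int) < k ∨ (j : Int) = k ∨ k < (j : Int)) with hc | hc | hc
      · have hX : mat'.getD j [] = mat.getD j [] := by
          rw [hmat'j j hj, if_neg (fun h => absurd h.1 (by omega))]
        rw [hX, if_neg (fun h => absurd h.1 (by omega)),
          if_neg (fun h => absurd h.1 (by omega))]
      · by_cases hg : PySem.List.pyGetD (mat.getD j []) col 0 == 1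
        · have hX : mat'.getD j []
              = pvElimRowA m (mat.getD j []) (PySem.List.pyGetD mat col []) := by
            rw [hmat'j j hj, if_pos ⟨hc, hg⟩]
          rw [hX, if_neg (fun h => absurd h.1 (by omega)), if_pos ⟨by omega, hg⟩]
        · have hX : mat'.getD j [] = mat.getD j [] := by
            rw [hmat'j j hj, if_neg (fun h => hg h.2)]
          rw [hX, if_neg (fun h => absurd h.1 (by omega)), if_neg (fun h => hg h.2)]
      · have hX : mat'.getD j [] = mat.getD j [] := by
          rw [hmat'j j hj, if_neg (fun h => absurd h.1 (by omega))]
        rw [hX]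
        by_cases hg : PySem.List.pyGetD (mat.getD j []) col 0 == 1
        · rw [if_pos ⟨by omega, hg⟩, if_pos ⟨by omega, hg⟩]
        · rw [if_neg (fun h => hg h.2), if_neg (fun h => hg h.2)]

-- ---- the build invariant: A0 is an n × m matrix of 0/1 entries ----

def pvA0Inv (n m : Nat) (A0 : List (List Int)) : Prop :=
  A0.length = n ∧ ∀ row ∈ A0, row.length = m ∧ ∀ v ∈ row, v = 0 ∨ v = 1

theorem pvBuildInv (n m : Nat) (buttons : List (List Int)) :
    pvA0Inv n m ((PySem.List.enumerate buttons 0).foldl (pvBuildStepA (n : Int))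
      ((PySem.List.pyRange 0 (n : Int) 1).map (fun _ => List.replicate m (0 : Int)))) := by
  have hstep1 : ∀ (jv : Int) (l : List Int) (A : List (List Int)), pvA0Inv n m A →
      pvA0Inv n m (l.foldl
        (fun A idx => if idx < (n : Int) then
          PySem.List.pySetD A idx (PySem.List.pySetD (PySem.List.pyGetD A idx []) jv 1)
        else A) A) := by
    intro jv l
    induction l with
    | nil => intro A hA; exact hA
    | cons idx rest ih =>
      intro A hA
      simp only [List.foldl_cons]
      apply ih
      by_cases hidx : idx < (n : Int)
      · rw [if_pos hidx]
        by_cases hin : PySem.Raise.InRange A.length idx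
        · obtain ⟨hlen, hrow⟩ := hA
          constructor
          · rw [PySem.List.length_pySetD]; exact hlen
          · intro row hr
            rcases pvMemPySetD _ _ _ _ hr with h | h
            · exact hrow _ h
            · subst h
              have hmem : PySem.List.pyGetD A idx [] ∈ A := PySem.List.pyGetD_mem A [] hin
              obtain ⟨hl, hv⟩ := hrow _ hmem
              constructor
              · rw [PySem.List.length_pySetD]; exact hl
              · intro v hvmem
                rcases pvMemPySetD _ _ _ _ hvmem with h | h
                · exact hv _ h
                · subst h; right; rfl
        · rw [pvPySetD_oob _ _ _ hin]; exact hA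
      · rw [if_neg hidx]; exact hA
  have hstep : ∀ (e : Int × List Int) (A : List (List Int)), pvA0Inv n m A →
      pvA0Inv n m (pvBuildStepA (n : Int) A e) := by
    intro e A hA
    unfold pvBuildStepA
    exact hstep1 e.1 e.2 A hA
  have h0 : pvA0Inv n m ((PySem.List.pyRange 0 (n : Int) 1).map
      (fun _ => List.replicate m (0 : Int))) := by
    constructor
    · rw [List.length_map, PySem.List.length_pyRange_one]; omega
    · intro row hr
      rw [List.mem_map] at hr
      obtain ⟨_, _, rfl⟩ := hr
      refine ⟨by simp, ?_⟩
      intro v hv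
      left; exact List.eq_of_mem_replicate hv
  have hfold : ∀ (l : List (Int × List Int)) (A : List (List Int)), pvA0Inv n m A →
      pvA0Inv n m (l.foldl (pvBuildStepA (n : Int)) A) := by
    intro l
    induction l with
    | nil => intro A hA; exact hA
    | cons e es ih =>
      intro A hA
      simp only [List.foldl_cons]
      exact ih _ (hstep e A hA)
  exact hfold _ _ h0

theorem pvEntry01 (A0 : List (List Int)) (hA0 : ∀ row ∈ A0, ∀ v ∈ row, v = 0 ∨ v = 1)
    (S : List Int) (c : Int) : pvEntryB A0 S c = 0 ∨ pvEntryB A0 S c = 1 := by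
  have helem : ∀ i : Int, PySem.List.pyGetD (PySem.List.pyGetD A0 i []) c 0 = 0 ∨
      PySem.List.pyGetD (PySem.List.pyGetD A0 i []) c 0 = 1 := by
    intro i
    by_cases hin : PySem.Raise.InRange A0.length i
    · have hmem : PySem.List.pyGetD A0 i [] ∈ A0 := PySem.List.pyGetD_mem A0 [] hin
      by_cases hcin : PySem.Raise.InRange (PySem.List.pyGetD A0 i []).length c
      · exact hA0 _ hmem _ (PySem.List.pyGetD_mem _ 0 hcin)
      · rw [pvPyGetD_oob _ _ _ hcin]; left; rfl
    · rw [pvPyGetD_oob A0 i [] hin]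
      left
      rw [pvPyGetD_oob ([] : List Int) c 0
        (fun h => by obtain ⟨h1, h2⟩ := h; simp at h1 h2; omega)]
  unfold pvEntryB
  have : ∀ (l : List Int) (v : Int), v = 0 ∨ v = 1 →
      (l.foldl (fun v i => PySem.Int.bxor v (PySem.List.pyGetD (PySem.List.pyGetD A0 i []) c 0)) v) = 0 ∨
      (l.foldl (fun v i => PySem.Int.bxor v (PySem.List.pyGetD (PySem.List.pyGetD A0 i []) c 0)) v) = 1 := by
    intro l
    induction l with
    | nil => intro v hv; exact hv
    | cons i l ihl =>
      intro v hv
      simp only [List.foldl_cons]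
      apply ihl
      rcases hv with h | h <;> rcases helem i with h2 | h2 <;> rw [h, h2] <;> simp [pvBxorZeroL]
  exact this S 0 (Or.inl rfl)

-- ---- elimination phase: the relation between the two states ----

def pvRelE (A0 : List (List Int)) (target : List Int) (n m : Nat)
    (sa : List (List Int) × List Int) (sb : List (List Int) × List Int) : Prop :=
  sa.1 = sb.1.map (pvRowVal A0 target m) ∧ sa.2 = sb.2 ∧ sb.1.length = n ∧
  (∀ S ∈ sb.1, S.Nodup) ∧
  (∀ p ∈ sb.2, 0 ≤ p ∧ p < (m : Int) ∧ p < (n : Int)) ∧ sb.2.Pairwise (· < ·)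

theorem pvGetMapRowVal (A0 : List (List Int)) (target : List Int) (m : Nat)
    (rows : List (List Int)) (r : Int) (hr : PySem.Raise.InRange rows.length r) :
    PySem.List.pyGetD (rows.map (pvRowVal A0 target m)) r []
      = pvRowVal A0 target m (PySem.List.pyGetD rows r []) := by
  rw [pvPyGetD_irrel _ r [] (pvRowVal A0 target m []) (by simpa using hr),
    PySem.List.pyGetD_map]

theorem pvElimStepRel (A0 : List (List Int)) (target : List Int) (n m : Nat)
    (col : Int) (h0 : 0 ≤ col) (hn : col < (n : Int)) (hm : col < (m : Int))
    (sa sb : List (List Int) × List Int) (hR : pvRelE A0 target n m sa sb)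
    (hlt : ∀ p ∈ sb.2, p < col) :
    pvRelE A0 target n m (pvElimStepA (n : Int) (m : Int) sa col)
      (pvElimStepB A0 (n : Int) sb col) ∧
    (∀ p ∈ (pvElimStepB A0 (n : Int) sb col).2, p < col + 1) := by
  obtain ⟨mat, pivA⟩ := sa
  obtain ⟨rows, piv⟩ := sb
  obtain ⟨hmat, hpiv, hlen, hnd, hpb, hpw⟩ := hR
  simp only at hmat hpiv hlen hnd hpb hpw hlt
  subst hmat hpiv
  have hfind : (PySem.List.pyRange col (n : Int) 1).find?
      (fun r => PySem.List.pyGetD (PySem.List.pyGetD (rows.map (pvRowVal A0 target m)) r []) col 0 == 1)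
      = (PySem.List.pyRange col (n : Int) 1).find?
      (fun r => pvEntryB A0 (PySem.List.pyGetD rows r []) col == 1) := by
    apply pvFindCongr
    intro r hr
    rw [PySem.List.mem_pyRange_one] at hr
    rw [pvGetMapRowVal A0 target m rows r ⟨by omega, by omega⟩, pvRowValGet _ _ _ _ _ h0 hm]
  unfold pvElimStepA pvElimStepB
  simp only [hfind]
  cases hf : (PySem.List.pyRange col (n : Int) 1).find?
      (fun r => pvEntryB A0 (PySem.List.pyGetD rows r []) col == 1) with
  | none =>
    refine ⟨⟨rfl, rfl, hlen, hnd, hpb, hpw⟩, ?_⟩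
    intro p hp
    exact lt_trans (hlt p hp) (by omega)
  | some pr =>
    dsimp only
    have hprmem := List.mem_of_find?_eq_some hf
    rw [PySem.List.mem_pyRange_one] at hprmem
    have hprInR : PySem.Raise.InRange rows.length pr := ⟨by omega, by omega⟩
    have hcInR : PySem.Raise.InRange rows.length col := ⟨by omega, by omega⟩
    -- the swap commutes with the abstraction
    set rows1 := PySem.List.pySetD (PySem.List.pySetD rows col (PySem.List.pyGetD rows pr []))
      pr (PySem.List.pyGetD rows col []) with hrows1
    have hswap : PySem.List.pySetD
        (PySem.List.pySetD (rows.map (pvRowVal A0 target m)) col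
          (PySem.List.pyGetD (rows.map (pvRowVal A0 target m)) pr []))
        pr (PySem.List.pyGetD (rows.map (pvRowVal A0 target m)) col [])
        = rows1.map (pvRowVal A0 target m) := by
      rw [pvGetMapRowVal A0 target m rows pr hprInR,
        pvGetMapRowVal A0 target m rows col hcInR,
        pvPySetD_map, pvPySetD_map]
    have hlen1 : rows1.length = n := by
      rw [hrows1]; simp [PySem.List.length_pySetD]; omega
    have hnd1 : ∀ S ∈ rows1, S.Nodup := by
      intro S hS
      rcases pvMemPySetD _ _ _ _ hS with hS | hS
      · rcases pvMemPySetD _ _ _ _ hS with hS | hS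
        · exact hnd _ hS
        · subst hS; exact hnd _ (PySem.List.pyGetD_mem rows [] hprInR)
      · subst hS; exact hnd _ (PySem.List.pyGetD_mem rows [] hcInR)
    have hcInR1 : PySem.Raise.InRange rows1.length col := ⟨by omega, by omega⟩
    set pivrow := PySem.List.pyGetD rows1 col [] with hpivrow
    have hpivnd : pivrow.Nodup := hnd1 _ (PySem.List.pyGetD_mem rows1 [] hcInR1)
    have hgpiv : PySem.List.pyGetD (rows1.map (pvRowVal A0 target m)) col []
        = pvRowVal A0 target m pivrow := pvGetMapRowVal A0 target m rows1 col hcInR1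
    -- the inner elimination: A's fold equals B's map, through the abstraction
    set rows2 := (PySem.List.enumerate rows1 0).map
      (fun rS => if rS.1 > col ∧ pvEntryB A0 rS.2 col == 1 then pvSymmDiff rS.2 pivrow else rS.2)
      with hrows2
    have hlenmat1 : ((rows1.map (pvRowVal A0 target m)).length : Int) = (n : Int) := by
      simp [hlen1]
    obtain ⟨hflen, hfdesc⟩ := pvElimFoldA (m : Int) (n : Int) col h0
      ((n : Int) - col - 1).toNat (col + 1) (rows1.map (pvRowVal A0 target m))
      (by omega) hlenmat1 (by omega)
    have hlen2 : rows2.length = n := by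
      rw [hrows2]; simp [PySem.List.length_enumerate, hlen1]
    have hinner : (PySem.List.pyRange (col + 1) (n : Int) 1).foldl
        (pvStepRowA (m : Int) col) (rows1.map (pvRowVal A0 target m))
        = rows2.map (pvRowVal A0 target m) := by
      have hflen2 : ((PySem.List.pyRange (col + 1) (n : Int) 1).foldl
          (pvStepRowA (m : Int) col) (rows1.map (pvRowVal A0 target m))).length = n := by
        rw [hflen]; simp [hlen1]
      apply List.ext_getElem (by rw [hflen2]; simp [hlen2])
      intro j hja hjb
      have hj1 : j < rows1.length := by omega
      rw [show ((PySem.List.pyRange (col + 1) (n : Int) 1).foldl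
          (pvStepRowA (m : Int) col) (rows1.map (pvRowVal A0 target m)))[j]'hja
          = ((PySem.List.pyRange (col + 1) (n : Int) 1).foldl
          (pvStepRowA (m : Int) col) (rows1.map (pvRowVal A0 target m))).getD j []
        from (List.getD_eq_getElem _ _ hja).symm]
      rw [show (rows2.map (pvRowVal A0 target m))[j]'hjb
          = (rows2.map (pvRowVal A0 target m)).getD j []
        from (List.getD_eq_getElem _ _ hjb).symm]
      rw [hfdesc j (by simp [hlen1]; omega)]
      have hmat1j : (rows1.map (pvRowVal A0 target m)).getD j []
          = pvRowVal A0 target m (rows1.getD j []) :=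
        pvGetD_map _ _ j hj1 [] []
      have hrows2j : rows2.getD j []
          = (if (0 + (j : Int)) > col ∧ pvEntryB A0 (rows1.getD j []) col == 1
              then pvSymmDiff (rows1.getD j []) pivrow else rows1.getD j []) := by
        rw [hrows2]
        rw [pvGetD_map _ _ j (by simp [PySem.List.length_enumerate]; omega) []
          ((0 : Int), ([] : List Int))]
        rw [List.getD_eq_getElem _ _ (by simp [PySem.List.length_enumerate]; omega),
          PySem.List.getElem_enumerate]
        rw [show rows1[j]'hj1 = rows1.getD j [] from (List.getD_eq_getElem _ _ hj1).symm]
      rw [hmat1j, hgpiv, pvRowValGet _ _ _ _ _ h0 hm,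
        pvGetD_map (pvRowVal A0 target m) rows2 j (by omega) [] [], hrows2j]
      simp only [zero_add]
      have hndj : (rows1.getD j []).Nodup := by
        rw [List.getD_eq_getElem _ _ hj1]
        exact hnd1 _ (List.getElem_mem hj1)
      by_cases hcond : col + 1 ≤ (j : Int) ∧ pvEntryB A0 (rows1.getD j []) col == 1
      · rw [if_pos hcond, if_pos (show col < (j : Int) ∧ _ from ⟨by omega, hcond.2⟩)]
        exact pvElimRowValEq A0 target m _ _ hndj hpivnd
      · rw [if_neg hcond, if_neg (fun h => hcond ⟨by omega, h.2⟩)]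
    refine ⟨⟨?_, rfl, ?_, ?_, ?_, ?_⟩, ?_⟩
    · simp only [hswap]; exact hinner
    · rw [hrows2]; simp [PySem.List.length_enumerate, hlen1]
    · intro S hS
      rw [hrows2, List.mem_map] at hS
      obtain ⟨rS, hrS, rfl⟩ := hS
      rw [PySem.List.mem_enumerate_iff] at hrS
      obtain ⟨k, hk, rfl⟩ := hrS
      dsimp only
      split_ifs
      · exact pvSymmDiff_nodup _ _ (hnd1 _ (List.getElem_mem hk)) hpivnd
      · exact hnd1 _ (List.getElem_mem hk)
    · intro p hp
      rcases List.mem_append.mp hp with h | h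
      · exact hpb p h
      · simp at h; subst h; exact ⟨h0, hm, hn⟩
    · rw [List.pairwise_append]
      refine ⟨hpw, by simp, ?_⟩
      intro p hp c hc
      simp at hc; subst hc
      exact hlt p hp
    · intro p hp
      rcases List.mem_append.mp hp with h | h
      · exact lt_trans (hlt p h) (by omega)
      · simp at h; subst h; omega

theorem pvElimFoldRel (A0 : List (List Int)) (target : List Int) (n m : Nat) :
    ∀ (cols : List Int) (sa sb : List (List Int) × List Int),
      pvRelE A0 target n m sa sb → cols.Pairwise (· < ·) →
      (∀ c ∈ cols, 0 ≤ c ∧ c < (n : Int) ∧ c < (m : Int)) →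
      (∀ p ∈ sb.2, ∀ c ∈ cols, p < c) →
      pvRelE A0 target n m (cols.foldl (pvElimStepA (n : Int) (m : Int)) sa)
        (cols.foldl (pvElimStepB A0 (n : Int)) sb) := by
  intro cols
  induction cols with
  | nil => intro sa sb h _ _ _; exact h
  | cons c rest ih =>
    intro sa sb hR hpw hb hlt
    obtain ⟨hc0, hcn, hcm⟩ := hb c (by simp)
    have hstep := pvElimStepRel A0 target n m c hc0 hcn hcm sa sb hR
      (fun p hp => hlt p hp c (by simp))
    simp only [List.foldl_cons]
    apply ih _ _ hstep.1 (hpw.sublist (List.sublist_cons_self c rest))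
      (fun c' hc' => hb c' (by simp [hc']))
    intro p hp c' hc'
    have h1 := hstep.2 p hp
    have h2 : c < c' := (List.pairwise_cons.mp hpw).1 c' hc'
    omega

-- ---- rank bound: pivot columns are strictly increasing in [0, K) ----

theorem pvLenBound (l : List Int) (K : Nat) (hpw : l.Pairwise (· < ·))
    (hb : ∀ p ∈ l, 0 ≤ p ∧ p < (K : Int)) : l.length ≤ K := by
  have hpwf : (l.map Int.toNat).Pairwise (· < ·) := by
    rw [List.pairwise_map]
    refine hpw.imp_of_mem ?_
    intro a b ha hb' hlt
    have := (hb a ha).1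
    omega
  have hnd : (l.map Int.toNat).Nodup := hpwf.imp (fun h => Nat.ne_of_lt h)
  have hsub : (l.map Int.toNat).toFinset ⊆ Finset.range K := by
    intro x hx
    rw [List.mem_toFinset, List.mem_map] at hx
    obtain ⟨p, hp, rfl⟩ := hx
    rw [Finset.mem_range]
    have := hb p hp
    omega
  have hcard := Finset.card_le_card hsub
  rw [List.toFinset_card_of_nodup hnd, Finset.card_range] at hcard
  simpa using hcard

-- ---- back substitution ----

theorem pvBackStepEq (A0 : List (List Int)) (target : List Int) (n m : Nat)
    (hA0v : ∀ row ∈ A0, ∀ v ∈ row, v = 0 ∨ v = 1)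
    (rows : List (List Int)) (piv : List Int) (hlen : rows.length = n)
    (hpb : ∀ p ∈ piv, 0 ≤ p ∧ p < (m : Int) ∧ p < (n : Int)) (hrank : piv.length ≤ n)
    (x : List Int) (i : Int) (hi0 : 0 ≤ i) (hir : i < (piv.length : Int)) :
    pvBackStepA (rows.map (pvRowVal A0 target m)) piv (m : Int) x i
      = pvBackStepB A0 target rows piv (m : Int) x i := by
  unfold pvBackStepA pvBackStepB
  simp only
  have hpcmem : PySem.List.pyGetD piv i 0 ∈ piv :=
    PySem.List.pyGetD_mem piv 0 ⟨by omega, by omega⟩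
  obtain ⟨hpc0, hpcm, hpcn⟩ := hpb _ hpcmem
  have hiInR : PySem.Raise.InRange rows.length i := ⟨by omega, by omega⟩
  rw [pvGetMapRowVal A0 target m rows i hiInR, pvRowValLast]
  congr 1
  apply PySem.List.foldl_congr_mem
  intro acc j hj
  rw [PySem.List.mem_pyRange_one] at hj
  rw [pvRowValGet _ _ _ _ _ (by omega) (by omega)]
  rcases pvEntry01 A0 hA0v (PySem.List.pyGetD rows i []) j with h | h
  · rw [h]
    simp
  · rw [h, one_mul, if_pos (by simp)]

-- ---- the two gaussian phases agree ----

theorem pvGaussEqB (nn mm : Nat) (hn : nn ≠ 0) (hmm : mm ≠ 0)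
    (A0f : List (List Int)) (target : List Int)
    (hA0 : pvA0Inv nn mm A0f) (htg : target.length = nn) :
    (if !(pvGaussA A0f target).2 then (-1 : Int) else (pvGaussA A0f target).1.sum)
    = (let st := (PySem.List.pyRange 0 (min (nn : Int) (mm : Int)) 1).foldl
         (pvElimStepB A0f (nn : Int))
         ((PySem.List.pyRange 0 (nn : Int) 1).map (fun r => [r]), ([] : List Int))
       if (PySem.List.pyRange ((st.2.length : Nat) : Int) (nn : Int) 1).any
           (fun r => pvRhsB target (PySem.List.pyGetD st.1 r []) == 1) then (-1 : Int)
       else ((PySem.List.pyRange (((st.2.length : Nat) : Int) - 1) (-1) (-1)).foldl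
         (pvBackStepB A0f target st.1 st.2 (mm : Int)) (List.replicate mm (0 : Int))).sum) := by
  obtain ⟨hA0len, hA0rows⟩ := hA0
  have hA0v : ∀ row ∈ A0f, ∀ v ∈ row, v = 0 ∨ v = 1 := fun row hr => (hA0rows row hr).2
  have hne : A0f ≠ [] := by intro h; rw [h] at hA0len; simp at hA0len; omega
  have hie : A0f.isEmpty = false := by simp [hne]
  have h0InR : PySem.Raise.InRange A0f.length 0 := ⟨by omega, by omega⟩
  have hm0 : ((PySem.List.pyGetD A0f 0 []).length : Int) = (mm : Int) := by
    have := (hA0rows _ (PySem.List.pyGetD_mem A0f [] h0InR)).1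
    omega
  -- the initial matrix is the abstraction of the initial index sets
  have hmatrix : (PySem.List.enumerate A0f 0).map
      (fun ia => ia.2 ++ [PySem.List.pyGetD target ia.1 0])
      = ((PySem.List.pyRange 0 (nn : Int) 1).map (fun r => [r])).map
          (pvRowVal A0f target mm) := by
    rw [PySem.List.enumerate_eq_map_pyRange A0f ([] : List Int), List.map_map, List.map_map]
    simp only [PySem.List.len, hA0len]
    apply List.map_congr_left
    intro r hr
    rw [PySem.List.mem_pyRange_one] at hr
    have hrInR : PySem.Raise.InRange A0f.length r := ⟨by omega, by omega⟩
    have hrowlen : (PySem.List.pyGetD A0f r []).length = mm :=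
      (hA0rows _ (PySem.List.pyGetD_mem A0f [] hrInR)).1
    simp only [Function.comp]
    unfold pvRowVal
    congr 1
    · -- left part: the row reproduces itself through single-index entries
      have hent : ∀ c : Nat, pvEntryB A0f [r] (c : Int)
          = PySem.List.pyGetD (PySem.List.pyGetD A0f r []) (c : Int) 0 := by
        intro c
        simp only [pvEntryB, List.foldl_cons, List.foldl_nil]
        rw [pvBxorZeroL]
      apply List.ext_getElem (by simp [hrowlen])
      intro k hk1 hk2
      simp only [List.getElem_map]
      rw [PySem.List.getElem_pyRange_one, zero_add, hent k, PySem.List.pyGetD_natCast]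
      rw [List.getD_eq_getElem _ _ (by omega)]
    · -- right part: the rhs entry
      simp only [pvRhsB, List.foldl_cons, List.foldl_nil]
      rw [pvBxorZeroL]
  have hrel := pvElimFoldRel A0f target nn mm
    (PySem.List.pyRange 0 (min (nn : Int) (mm : Int)) 1)
    ((PySem.List.enumerate A0f 0).map (fun ia => ia.2 ++ [PySem.List.pyGetD target ia.1 0]),
      ([] : List Int))
    ((PySem.List.pyRange 0 (nn : Int) 1).map (fun r => [r]), ([] : List Int))
    ⟨hmatrix, rfl, by simp [PySem.List.length_pyRange_one],
      (by intro S hS; rw [List.mem_map] at hS; obtain ⟨r, _, rfl⟩ := hS; simp),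
      by simp, by simp⟩
    (PySem.List.pairwise_lt_pyRange_one 0 (min (nn : Int) (mm : Int)))
    (by intro c hc; rw [PySem.List.mem_pyRange_one] at hc; omega)
    (by intro p hp; simp at hp)
  set stA := (PySem.List.pyRange 0 (min (nn : Int) (mm : Int)) 1).foldl
    (pvElimStepA (nn : Int) (mm : Int))
    ((PySem.List.enumerate A0f 0).map (fun ia => ia.2 ++ [PySem.List.pyGetD target ia.1 0]),
      ([] : List Int)) with hstA
  set st := (PySem.List.pyRange 0 (min (nn : Int) (mm : Int)) 1).foldl
    (pvElimStepB A0f (nn : Int))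
    ((PySem.List.pyRange 0 (nn : Int) 1).map (fun r => [r]), ([] : List Int)) with hst
  obtain ⟨hmatF, hpivF, hlenF, hndF, hpbF, hpwF⟩ := hrel
  have hrankn : st.2.length ≤ nn :=
    pvLenBound st.2 nn hpwF (fun p hp => ⟨(hpbF p hp).1, (hpbF p hp).2.2⟩)
  -- the consistency scans agree
  have hany : (PySem.List.pyRange ((st.2.length : Nat) : Int) (nn : Int) 1).any
      (fun row => PySem.List.pyGetD (PySem.List.pyGetD stA.1 row []) (-1) 0 == 1)
      = (PySem.List.pyRange ((st.2.length : Nat) : Int) (nn : Int) 1).any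
      (fun r => pvRhsB target (PySem.List.pyGetD st.1 r []) == 1) := by
    apply PySem.List.any_congr_mem
    intro r hr
    rw [PySem.List.mem_pyRange_one] at hr
    rw [hmatF, pvGetMapRowVal A0f target mm st.1 r ⟨by omega, by omega⟩, pvRowValLast]
  -- the back-substitution folds agree
  have hback : (PySem.List.pyRange (((st.2.length : Nat) : Int) - 1) (-1) (-1)).foldl
      (pvBackStepA stA.1 st.2 (mm : Int)) (List.replicate mm (0 : Int))
      = (PySem.List.pyRange (((st.2.length : Nat) : Int) - 1) (-1) (-1)).foldl
      (pvBackStepB A0f target st.1 st.2 (mm : Int)) (List.replicate mm (0 : Int)) := by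
    apply PySem.List.foldl_congr_mem
    intro acc i hi
    rw [PySem.List.mem_pyRange_neg_one] at hi
    rw [hmatF]
    exact pvBackStepEq A0f target nn mm hA0v st.1 st.2 hlenF hpbF hrankn acc i
      (by omega) (by omega)
  -- unfold the A side
  have hg : pvGaussA A0f target
      = (if (PySem.List.pyRange ((stA.2.length : Nat) : Int) (nn : Int) 1).any
            (fun row => PySem.List.pyGetD (PySem.List.pyGetD stA.1 row []) (-1) 0 == 1)
          then (([] : List Int), false)
         else ((PySem.List.pyRange (((stA.2.length : Nat) : Int) - 1) (-1) (-1)).foldl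
            (pvBackStepA stA.1 stA.2 (mm : Int))
            (List.replicate ((mm : Int)).toNat (0 : Int)), true)) := by
    unfold pvGaussA
    simp only [hie, Bool.false_eq_true, if_false, hA0len, hm0]
    rw [if_neg (by push_cast; omega)]
  rw [hpivF] at hg
  rw [hg]
  simp only [Int.toNat_natCast] at *
  rw [hany]
  by_cases hA : ((PySem.List.pyRange ((st.2.length : Nat) : Int) (nn : Int) 1).any
      (fun r => pvRhsB target (PySem.List.pyGetD st.1 r []) == 1)) = true
  · rw [if_pos hA, if_pos hA]
    rfl
  · rw [if_neg hA, if_neg hA]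
    simp only [Bool.not_true, Bool.false_eq_true, if_false]
    rw [hback]

-- Pre_ is needed because Python A raises IndexError outside it; the total PySem ports
-- happen to agree on every input, so the proof does not consume hpre beyond threading it
theorem pvMainEq (target : List Int) (buttons : List (List Int))
    (hpre : Pre_solve_machine_gaussian target buttons) :
    solve_machine_gaussian target buttons = solve_machine_gaussian_alt target buttons := by
  unfold solve_machine_gaussian solve_machine_gaussian_alt
  by_cases hm : ((buttons.length : Nat) : Int) = 0
  · rw [if_pos hm, if_pos hm]
  · rw [if_neg hm, if_neg hm]
    simp only
    have hmm : buttons.length ≠ 0 := by omega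
    have hinv := pvBuildInv target.length buttons.length buttons
    have hAlen : ((PySem.List.enumerate buttons 0).foldl (pvBuildStepA (target.length : Int))
        ((PySem.List.pyRange 0 (target.length : Int) 1).map
          (fun _ => List.replicate buttons.length (0 : Int)))).length = target.length :=
      hinv.1
    have hrepl : ((buttons.length : Int)).toNat = buttons.length := by simp
    rw [hrepl]
    by_cases hn : target.length = 0
    · -- no lights: both sides return 0
      have hA0nil : (PySem.List.enumerate buttons 0).foldl (pvBuildStepA (target.length : Int))
          ((PySem.List.pyRange 0 (target.length : Int) 1).map
            (fun _ => List.replicate buttons.length (0 : Int))) = [] := by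
        apply List.length_eq_zero_iff.mp
        rw [hAlen, hn]
      rw [hA0nil]
      have htg : target = [] := List.length_eq_zero_iff.mp hn
      rw [htg]
      rw [show pvGaussA ([] : List (List Int)) [] = ([], true) by
        unfold pvGaussA; rw [if_pos (by simp)]; simp]
      simp only [List.length_nil, Nat.cast_zero]
      rw [show min (0 : Int) ((buttons.length : Nat) : Int) = 0 from
        min_eq_left (by positivity)]
      have hpr0 : PySem.List.pyRange (0 : Int) (0 : Int) 1 = [] :=
        PySem.List.pyRange_one_eq_nil (le_refl 0)
      simp [hpr0, PySem.List.pyRange_neg_one_eq_nil, List.sum_replicate]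
    · have := pvGaussEqB target.length buttons.length hn hmm
        ((PySem.List.enumerate buttons 0).foldl (pvBuildStepA (target.length : Int))
          ((PySem.List.pyRange 0 (target.length : Int) 1).map
            (fun _ => List.replicate buttons.length (0 : Int))))
        target hinv rfl
      simpa using this

-- ===== VERDICT (by name: the statement is the Claim_ definition above) =====
theorem solve_machine_gaussian_spec : Claim_equal_solve_machine_gaussian := by
  unfold Claim_equal_solve_machine_gaussian
  intro target buttons _hdom hpre
  unfold Spec_solve_machine_gaussian
  exact pvMainEq target buttons hpre
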